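-- pv_equiv track=rewrite | github.com/weichert/squadvault | scripts/_patch_ops_fix_pairing_gate_cta_placement_v6.py | insert_cta_after_fix_guidance
-- ===== SOURCE A (Python) =====
-- FIX_GUIDANCE_SUBSTR = "Fix by adding the missing counterpart, or (rarely) allowlist the path:"
--
-- CTA_ECHO_BLOCK_LINES = [
--     "echo\n",
--     'echo "=== NEXT: Fix patcher/wrapper pairing failures ==="\n',
--     'echo "1) Add the missing pair(s): scripts/patch_*.sh <-> scripts/_patch_*.py"\n',
--     'echo "2) Then regenerate the allowlist (if still needed):"\n',
--     'echo "   bash scripts/patch_ops_rewrite_patch_pair_allowlist_v2.sh"\n',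
--     'echo "NOTE: scripts/patch_pair_allowlist_v1.txt is auto-generated; manual edits will be overwritten."\n',
--     "echo\n",
-- ]
--
-- def insert_cta_after_fix_guidance(lines: list[str]) -> tuple[list[str], bool]:
--     out: list[str] = []
--     inserted = False
--     for line in lines:
--         out.append(line)
--         if (not inserted) and (FIX_GUIDANCE_SUBSTR in line):
--             out.extend(CTA_ECHO_BLOCK_LINES)
--             inserted = True
--     return out, inserted
-- ===== SOURCE B (Python) =====
-- FIX_GUIDANCE_SUBSTR = "Fix by adding the missing counterpart, or (rarely) allowlist the path:"
--
-- CTA_ECHO_BLOCK_LINES = [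
--     "echo\n",
--     'echo "=== NEXT: Fix patcher/wrapper pairing failures ==="\n',
--     'echo "1) Add the missing pair(s): scripts/patch_*.sh <-> scripts/_patch_*.py"\n',
--     'echo "2) Then regenerate the allowlist (if still needed):"\n',
--     'echo "   bash scripts/patch_ops_rewrite_patch_pair_allowlist_v2.sh"\n',
--     'echo "NOTE: scripts/patch_pair_allowlist_v1.txt is auto-generated; manual edits will be overwritten."\n',
--     "echo\n",
-- ]
--
-- def insert_cta_after_fix_guidance(lines: list[str]) -> tuple[list[str], bool]:
--     idx = next((i for i, line in enumerate(lines) if FIX_GUIDANCE_SUBSTR in line), None)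
--     if idx is None:
--         return list(lines), False
--     return lines[:idx + 1] + CTA_ECHO_BLOCK_LINES + lines[idx + 1:], True
-- ===== Notes on version B (the rewrite author's own statement) =====
-- stated objective: simpler
-- what changed: Replaces the per-line append loop with a mutable inserted flag by locate-then-splice: find the index of the first guidance line, then build the result by slicing around it.
import Mathlib
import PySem

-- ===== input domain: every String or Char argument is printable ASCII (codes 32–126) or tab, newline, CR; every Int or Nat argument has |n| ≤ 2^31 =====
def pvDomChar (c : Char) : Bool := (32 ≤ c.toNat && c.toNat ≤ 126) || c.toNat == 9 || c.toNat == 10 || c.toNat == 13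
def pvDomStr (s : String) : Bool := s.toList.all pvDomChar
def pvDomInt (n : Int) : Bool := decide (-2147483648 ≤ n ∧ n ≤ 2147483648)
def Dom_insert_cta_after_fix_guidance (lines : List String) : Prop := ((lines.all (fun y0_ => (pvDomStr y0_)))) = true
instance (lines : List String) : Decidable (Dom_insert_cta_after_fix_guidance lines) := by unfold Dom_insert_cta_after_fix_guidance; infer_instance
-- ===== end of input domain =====

-- B replaces A's append-with-flag loop by locate-then-splice (find first guidance line, then slice); objective: simpler.



-- ===== PORT A =====
def pvFixGuidanceSubstr : String := "Fix by adding the missing counterpart, or (rarely) allowlist the path:"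

def pvCtaEchoBlockLines : List String :=
  [ "echo\n",
    "echo \"=== NEXT: Fix patcher/wrapper pairing failures ===\"\n",
    "echo \"1) Add the missing pair(s): scripts/patch_*.sh <-> scripts/_patch_*.py\"\n",
    "echo \"2) Then regenerate the allowlist (if still needed):\"\n",
    "echo \"   bash scripts/patch_ops_rewrite_patch_pair_allowlist_v2.sh\"\n",
    "echo \"NOTE: scripts/patch_pair_allowlist_v1.txt is auto-generated; manual edits will be overwritten.\"\n",
    "echo\n" ]

-- A's loop body: append the line; if not yet inserted and it contains the guidance substring, append the CTA block and set the flag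
def pvStepA (st : List String × Bool) (line : String) : List String × Bool :=
  let out := st.1 ++ [line]
  if !st.2 && PySem.Str.isIn pvFixGuidanceSubstr line then
    (out ++ pvCtaEchoBlockLines, true)
  else
    (out, st.2)

-- A: one pass appending each line, inserting the CTA block after the first guidance line (flag `inserted`)
def insert_cta_after_fix_guidance (lines : List String) : List String × Bool :=
  lines.foldl pvStepA ([], false)

-- ===== PORT B =====
-- B helper: index of the first line containing the guidance substring (Python's next(... enumerate ...))
def pvFindGuidanceIdx : List String → Option Nat
  | [] => none
  | l :: ls =>
      if PySem.Str.isIn pvFixGuidanceSubstr l then some 0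
      else (pvFindGuidanceIdx ls).map (· + 1)

-- B: locate-then-splice
def insert_cta_after_fix_guidance_alt (lines : List String) : List String × Bool :=
  match pvFindGuidanceIdx lines with
  | none => (lines, false)
  | some i => (lines.take (i + 1) ++ pvCtaEchoBlockLines ++ lines.drop (i + 1), true)

-- ===== PRECONDITION & SPEC =====
def Spec_insert_cta_after_fix_guidance (lines : List String) (out : List String × Bool) : Prop := out = insert_cta_after_fix_guidance_alt lines
instance (lines : List String) (out : List String × Bool) : Decidable (Spec_insert_cta_after_fix_guidance lines out) := by unfold Spec_insert_cta_after_fix_guidance; infer_instance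

-- ===== CLAIM (what is proved, stated in full; the proofs are below) =====
def Claim_equal_insert_cta_after_fix_guidance : Prop := ∀ (lines : List String), Dom_insert_cta_after_fix_guidance lines → Spec_insert_cta_after_fix_guidance lines (insert_cta_after_fix_guidance lines)

-- ===== LEMMAS AND PROOFS =====

theorem pvStepA_true (acc : List String) (l : String) :
    pvStepA (acc, true) l = (acc ++ [l], true) := by
  simp [pvStepA]

-- A's loop started with the flag already set just appends the rest.
theorem pvFold_inserted (lines : List String) (acc : List String) :
    lines.foldl pvStepA (acc, true) = (acc ++ lines, true) := by
  induction lines generalizing acc with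
  | nil => simp
  | cons l ls ih =>
      rw [List.foldl_cons, pvStepA_true, ih, List.append_assoc]
      rfl

-- A's loop from (acc, false) equals locate-then-splice prefixed by acc.
theorem pvFold_not_inserted (lines : List String) (acc : List String) :
    lines.foldl pvStepA (acc, false) =
    (match pvFindGuidanceIdx lines with
     | none => (acc ++ lines, false)
     | some i => (acc ++ (lines.take (i + 1) ++ pvCtaEchoBlockLines ++ lines.drop (i + 1)), true)) := by
  induction lines generalizing acc with
  | nil => simp [pvFindGuidanceIdx]
  | cons l ls ih =>
      by_cases h : PySem.Chars.isIn pvFixGuidanceSubstr.toList l.toList = true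
      · rw [List.foldl_cons]
        have hs : pvStepA (acc, false) l = (acc ++ [l] ++ pvCtaEchoBlockLines, true) := by
          simp [pvStepA, PySem.Str.isIn, h]
        rw [hs, pvFold_inserted]
        simp [pvFindGuidanceIdx, PySem.Str.isIn, h, List.append_assoc]
      · rw [List.foldl_cons]
        have hs : pvStepA (acc, false) l = (acc ++ [l], false) := by
          simp [pvStepA, PySem.Str.isIn, h]
        rw [hs, ih]
        cases hf : pvFindGuidanceIdx ls with
        | none => simp [pvFindGuidanceIdx, PySem.Str.isIn, h, hf]
        | some i => simp [pvFindGuidanceIdx, PySem.Str.isIn, h, hf, List.append_assoc]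

-- ===== VERDICT (by name: the statement is the Claim_ definition above) =====
theorem insert_cta_after_fix_guidance_spec : Claim_equal_insert_cta_after_fix_guidance := by
  intro lines _
  show insert_cta_after_fix_guidance lines = insert_cta_after_fix_guidance_alt lines
  unfold insert_cta_after_fix_guidance insert_cta_after_fix_guidance_alt
  rw [pvFold_not_inserted]
  cases pvFindGuidanceIdx lines <;> simp
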